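-- pv_equiv track=rewrite | github.com/ColinAnthony/NGS_analysis_pipeline | calc_v_loop_stats.py | loop_all_charge
-- ===== SOURCE A (Python) =====
-- def loop_all_charge(seq):
--     """
--     :param seq: a protein sequence string
--     :return: number of pos and neg charged residues in the loop
--     """
--     charge_pos = 0
--     charge_neg = 0
--     pos = {"R": 1, "K": 1, "H": 1}
--     neg = {"E": -1, "D": -1}
--     for item in seq:
--         if item in pos.keys():
--             charge_pos += pos[item]
--         elif item in neg.keys():
--             charge_neg += neg[item]
--
--     return charge_pos, charge_neg
-- ===== SOURCE B (Python) =====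
-- def loop_all_charge(seq):
--     """
--     :param seq: a protein sequence string
--     :return: number of pos and neg charged residues in the loop
--     """
--     charge_pos = seq.count("R") + seq.count("K") + seq.count("H")
--     charge_neg = -(seq.count("E") + seq.count("D"))
--     return charge_pos, charge_neg
-- ===== Notes on version B (the rewrite author's own statement) =====
-- stated objective: idiomatic
-- what changed: Replaced the per-character branching loop over dict keys by five str.count calls whose results are combined arithmetically (histogram-lookup shape, no explicit loop or branches).
import Mathlib
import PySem

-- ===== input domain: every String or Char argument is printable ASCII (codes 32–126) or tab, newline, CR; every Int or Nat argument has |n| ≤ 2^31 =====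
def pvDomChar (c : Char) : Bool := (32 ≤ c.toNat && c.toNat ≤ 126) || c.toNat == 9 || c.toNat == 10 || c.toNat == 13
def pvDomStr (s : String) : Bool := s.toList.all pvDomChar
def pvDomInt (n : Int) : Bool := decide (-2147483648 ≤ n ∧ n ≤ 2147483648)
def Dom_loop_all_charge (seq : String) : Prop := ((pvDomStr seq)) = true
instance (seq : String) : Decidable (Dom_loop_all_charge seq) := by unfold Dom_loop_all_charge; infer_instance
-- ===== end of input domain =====

-- B replaces A's per-character branching loop by str.count calls combined arithmetically (idiomatic).

-- ===== PORT A =====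
-- literal port: pos/neg dicts, a fold over the characters branching on key membership
def loop_all_charge (seq : String) : Int × Int :=
  let pos : PySem.Dict Char Int := PySem.Dict.mk [('R', 1), ('K', 1), ('H', 1)]
  let neg : PySem.Dict Char Int := PySem.Dict.mk [('E', -1), ('D', -1)]
  seq.toList.foldl
    (fun (st : Int × Int) item =>
      if PySem.Dict.contains pos item then
        (st.1 + (PySem.Dict.get? pos item).getD 0, st.2)   -- pos[item]; key present, so getD never defaults
      else if PySem.Dict.contains neg item then
        (st.1, st.2 + (PySem.Dict.get? neg item).getD 0)   -- neg[item]; key present, so getD never defaults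
      else st)
    (0, 0)

-- ===== PORT B =====
def loop_all_charge_alt (seq : String) : Int × Int :=
  let charge_pos : Int :=
    (PySem.Str.count seq "R" : Int) + (PySem.Str.count seq "K" : Int) + (PySem.Str.count seq "H" : Int)
  let charge_neg : Int := -((PySem.Str.count seq "E" : Int) + (PySem.Str.count seq "D" : Int))
  (charge_pos, charge_neg)

-- ===== PRECONDITION & SPEC =====
def Spec_loop_all_charge (seq : String) (out : Int × Int) : Prop := out = loop_all_charge_alt seq
instance (seq : String) (out : Int × Int) : Decidable (Spec_loop_all_charge seq out) := by unfold Spec_loop_all_charge; infer_instance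

-- ===== CLAIM (what is proved, stated in full; the proofs are below) =====
def Claim_equal_loop_all_charge : Prop := ∀ (seq : String), Dom_loop_all_charge seq → Spec_loop_all_charge seq (loop_all_charge seq)

-- ===== LEMMAS AND PROOFS =====

-- PySem.Chars.count on a single-character pattern is List.count
lemma chars_count_go_single (c : Char) (l : List Char) (fuel acc : Nat)
    (h : l.length ≤ fuel) :
    PySem.Chars.count.go [c] fuel l acc = acc + l.count c := by
  induction l generalizing fuel acc with
  | nil => cases fuel <;> simp [PySem.Chars.count.go]
  | cons x t ih =>
    cases fuel with
    | zero => simp at h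
    | succ n =>
      simp only [List.length_cons, Nat.succ_le_succ_iff] at h
      by_cases hx : x = c
      · subst hx
        simp [PySem.Chars.count.go, List.isPrefixOf, ih n (acc + 1) h]
        omega
      · have hcx : List.isPrefixOf [c] (x :: t) = false := by
          simp [List.isPrefixOf]; exact fun h' => hx h'.symm
        simp [PySem.Chars.count.go, hcx, ih n acc h, hx]

lemma chars_count_single (c : Char) (l : List Char) :
    PySem.Chars.count l [c] = l.count c := by
  simp [PySem.Chars.count, chars_count_go_single c l l.length 0 le_rfl]

-- proof-side name for A's loop body
def pvStepA (st : Int × Int) (item : Char) : Int × Int :=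
  if PySem.Dict.contains (PySem.Dict.mk [('R', (1:Int)), ('K', 1), ('H', 1)]) item then
    (st.1 + (PySem.Dict.get? (PySem.Dict.mk [('R', (1:Int)), ('K', 1), ('H', 1)]) item).getD 0, st.2)
  else if PySem.Dict.contains (PySem.Dict.mk [('E', (-1:Int)), ('D', -1)]) item then
    (st.1, st.2 + (PySem.Dict.get? (PySem.Dict.mk [('E', (-1:Int)), ('D', -1)]) item).getD 0)
  else st

lemma stepA_eq (st : Int × Int) (c : Char) :
    pvStepA st c =
      (st.1 + (if c = 'R' ∨ c = 'K' ∨ c = 'H' then 1 else 0),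
       st.2 - (if c = 'E' ∨ c = 'D' then 1 else 0)) := by
  by_cases hR : c = 'R'
  · subst hR; simp [pvStepA, PySem.Dict.contains_mk, PySem.Dict.get?_mk_cons]
  · by_cases hK : c = 'K'
    · subst hK; simp [pvStepA, PySem.Dict.contains_mk, PySem.Dict.get?_mk_cons]
    · by_cases hH : c = 'H'
      · subst hH; simp [pvStepA, PySem.Dict.contains_mk, PySem.Dict.get?_mk_cons]
      · by_cases hE : c = 'E'
        · subst hE; simp [pvStepA, PySem.Dict.contains_mk, PySem.Dict.get?_mk_cons]; ring
        · by_cases hD : c = 'D'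
          · subst hD; simp [pvStepA, PySem.Dict.contains_mk, PySem.Dict.get?_mk_cons]; ring
          · simp [pvStepA, PySem.Dict.contains_mk, Ne.symm hR, Ne.symm hK, Ne.symm hH,
                  Ne.symm hE, Ne.symm hD, hR, hK, hH, hE, hD]

-- characterisation of A's fold
lemma foldA (l : List Char) (a b : Int) :
    l.foldl pvStepA (a, b)
    = (a + l.count 'R' + l.count 'K' + l.count 'H',
       b - l.count 'E' - l.count 'D') := by
  induction l generalizing a b with
  | nil => simp
  | cons x t ih =>
    rw [List.foldl_cons, stepA_eq, ih]
    simp only [List.count_cons, Prod.mk.injEq]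
    constructor <;> · split_ifs with h <;> simp_all <;> ring

-- ===== VERDICT (by name: the statement is the Claim_ definition above) =====
theorem loop_all_charge_spec : Claim_equal_loop_all_charge := by
  intro seq _
  unfold Spec_loop_all_charge loop_all_charge loop_all_charge_alt
  simp only [PySem.Str.count_eq]
  rw [show (fun (st : Int × Int) item =>
      if PySem.Dict.contains (PySem.Dict.mk [('R', (1:Int)), ('K', 1), ('H', 1)]) item then
        (st.1 + (PySem.Dict.get? (PySem.Dict.mk [('R', (1:Int)), ('K', 1), ('H', 1)]) item).getD 0, st.2)
      else if PySem.Dict.contains (PySem.Dict.mk [('E', (-1:Int)), ('D', -1)]) item then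
        (st.1, st.2 + (PySem.Dict.get? (PySem.Dict.mk [('E', (-1:Int)), ('D', -1)]) item).getD 0)
      else st) = pvStepA from rfl, foldA]
  have hR := chars_count_single 'R' seq.toList
  have hK := chars_count_single 'K' seq.toList
  have hH := chars_count_single 'H' seq.toList
  have hE := chars_count_single 'E' seq.toList
  have hD := chars_count_single 'D' seq.toList
  simp only [show ("R":String).toList = ['R'] from rfl, show ("K":String).toList = ['K'] from rfl,
             show ("H":String).toList = ['H'] from rfl, show ("E":String).toList = ['E'] from rfl,
             show ("D":String).toList = ['D'] from rfl, hR, hK, hH, hE, hD]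
  simp only [Prod.mk.injEq]
  constructor <;> ring
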